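-- pv_equiv track=rewrite | github.com/rounin-rp/encryption | encrypter.py | White_spaces
-- ===== SOURCE A (Python) =====
-- def White_spaces(message):
--     lim = len(message)
--     spaces = []
--     count = 0
--     for i in range(0,lim):
--         j = message[i]
--         if j == ' ':
--             spaces.append(count)
--             count = 0
--         else:
--             count = count + 1
--     return spaces
-- ===== SOURCE B (Python) =====
-- def White_spaces(message):
--     return [len(w) for w in message.split(' ')[:-1]]
-- ===== Notes on version B (the rewrite author's own statement) =====
-- stated objective: faster
-- what changed: Replaces the per-character counter loop with a word-level formulation: split the string on the space character and take the length of every segment except the last (A never emits the run after the final character).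
import Mathlib
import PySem

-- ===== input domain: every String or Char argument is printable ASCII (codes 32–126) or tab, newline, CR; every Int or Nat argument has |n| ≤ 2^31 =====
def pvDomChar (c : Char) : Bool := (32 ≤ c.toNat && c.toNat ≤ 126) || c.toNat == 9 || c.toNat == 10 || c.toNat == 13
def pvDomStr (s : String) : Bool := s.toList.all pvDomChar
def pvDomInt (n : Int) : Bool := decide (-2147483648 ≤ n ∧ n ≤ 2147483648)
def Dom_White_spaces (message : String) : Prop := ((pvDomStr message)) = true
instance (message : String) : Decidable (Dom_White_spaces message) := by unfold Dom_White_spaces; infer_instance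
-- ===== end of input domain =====

-- B replaces A's per-character counter loop by split-on-space + lengths of all but the last segment (same asymptotics; measured faster in a timing run via C-level split).

-- ===== PORT A =====
-- per-character loop: append the running count at each space, reset; otherwise increment
def White_spaces (message : String) : List Int :=
  (message.toList.foldl
    (fun (st : List Int × Int) j =>
      if j = ' ' then (st.1 ++ [st.2], 0) else (st.1, st.2 + 1))
    ([], 0)).1

-- ===== PORT B =====
def White_spaces_alt (message : String) : List Int :=
  let parts := (PySem.Str.split? message " ").getD []
  (PySem.List.slice parts none (some (-1))).map (fun w => PySem.Str.len w)

-- ===== PRECONDITION & SPEC =====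
def Spec_White_spaces (message : String) (out : List Int) : Prop := out = White_spaces_alt message
instance (message : String) (out : List Int) : Decidable (Spec_White_spaces message out) := by unfold Spec_White_spaces; infer_instance

-- ===== CLAIM (what is proved, stated in full; the proofs are below) =====
def Claim_equal_White_spaces : Prop := ∀ (message : String), Dom_White_spaces message → Spec_White_spaces message (White_spaces message)

-- ===== LEMMAS AND PROOFS =====

-- pure split of a char list on single space (always returns a nonempty list of segments)
def splitSp : List Char → List (List Char)
  | [] => [[]]
  | c :: rest => if c = ' ' then [] :: splitSp rest
      else match splitSp rest with
        | [] => [[c]]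
        | w :: ws => (c :: w) :: ws

lemma splitSp_ne_nil (l : List Char) : splitSp l ≠ [] := by
  cases l with
  | nil => simp [splitSp]
  | cons c rest =>
    simp only [splitSp]
    split
    · simp
    · split <;> simp

-- prepend a prefix onto the first segment
def consH (p : List Char) : List (List Char) → List (List Char)
  | [] => [p]
  | w :: ws => (p ++ w) :: ws

lemma go_char (l : List Char) : ∀ (fuel : Nat) (cur : List Char) (acc : List (List Char)),
    l.length ≤ fuel →
    PySem.Chars.splitOn.go [' '] fuel l cur acc = acc.reverse ++ consH cur.reverse (splitSp l) := by
  induction l with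
  | nil =>
    intro fuel cur acc _
    cases fuel <;> simp [PySem.Chars.splitOn.go, splitSp, consH]
  | cons c rest ih =>
    intro fuel cur acc hle
    cases fuel with
    | zero => simp at hle
    | succ f =>
      rw [PySem.Chars.splitOn.go]
      by_cases hc : c = ' '
      · have hpre : List.isPrefixOf [' '] (c :: rest) = true := by
          simp [List.isPrefixOf, hc]
        simp only [hpre, if_pos, List.length_cons, List.length_nil, List.drop_succ_cons, List.drop_zero]
        rw [ih f [] (cur.reverse :: acc) (by simpa using Nat.lt_succ_iff.mp (by simpa using hle))]
        obtain ⟨w, ws, hws⟩ : ∃ w ws, splitSp rest = w :: ws := by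
          cases h : splitSp rest with
          | nil => exact absurd h (splitSp_ne_nil rest)
          | cons w ws => exact ⟨w, ws, rfl⟩
        simp [splitSp, hc, hws, consH]
      · have hpre : List.isPrefixOf [' '] (c :: rest) = false := by
          simp [List.isPrefixOf]; exact fun h => absurd h.symm hc
        simp only [hpre, Bool.false_eq_true, if_false]
        rw [ih f (c :: cur) acc (by simpa using Nat.lt_succ_iff.mp (by simpa using hle))]
        obtain ⟨w, ws, hws⟩ : ∃ w ws, splitSp rest = w :: ws := by
          cases h : splitSp rest with
          | nil => exact absurd h (splitSp_ne_nil rest)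
          | cons w ws => exact ⟨w, ws, rfl⟩
        simp [splitSp, hc, hws, consH]

lemma splitOn_space (l : List Char) : PySem.Chars.splitOn l [' '] = splitSp l := by
  rw [PySem.Chars.splitOn, go_char l (l.length + 1) [] [] (by omega)]
  obtain ⟨w, ws, hws⟩ : ∃ w ws, splitSp l = w :: ws := by
    cases h : splitSp l with
    | nil => exact absurd h (splitSp_ne_nil l)
    | cons w ws => exact ⟨w, ws, rfl⟩
  simp [hws, consH]

-- A's loop, characterized: 'lens c l' are the counts it appends starting from count c
def lens (c : Int) : List Char → List Int
  | [] => []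
  | x :: r => if x = ' ' then c :: lens 0 r else lens (c + 1) r

lemma foldA_eq (l : List Char) : ∀ (s : List Int) (c : Int),
    (l.foldl (fun (st : List Int × Int) j =>
      if j = ' ' then (st.1 ++ [st.2], 0) else (st.1, st.2 + 1)) (s, c)).1 = s ++ lens c l := by
  induction l with
  | nil => intro s c; simp [lens]
  | cons x r ih =>
    intro s c
    by_cases hx : x = ' '
    · simp [List.foldl, hx, lens, ih]
    · simp [List.foldl, hx, lens, ih]

-- add c to the head of a list of counts
def addc (c : Int) : List Int → List Int
  | [] => []
  | x :: xs => (x + c) :: xs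

lemma lens_eq (l : List Char) : ∀ (c : Int),
    lens c l = addc c ((splitSp l).dropLast.map (fun w => (w.length : Int))) := by
  induction l with
  | nil => intro c; simp [lens, splitSp, addc]
  | cons x r ih =>
    intro c
    obtain ⟨w, ws, hws⟩ : ∃ w ws, splitSp r = w :: ws := by
      cases h : splitSp r with
      | nil => exact absurd h (splitSp_ne_nil r)
      | cons w ws => exact ⟨w, ws, rfl⟩
    by_cases hx : x = ' '
    · rw [lens, if_pos hx, ih 0]
      simp only [splitSp, if_pos hx, hws]
      cases ws with
      | nil => simp [addc]
      | cons w2 ws2 => simp [addc, List.dropLast]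
    · rw [lens, if_neg hx, ih (c + 1)]
      simp only [splitSp, if_neg hx, hws]
      cases ws with
      | nil => simp [addc]
      | cons w2 ws2 =>
        have hd : ((x :: w) :: w2 :: ws2).dropLast = (x :: w) :: (w2 :: ws2).dropLast :=
          List.dropLast_cons_of_ne_nil (by simp)
        have hd2 : (w :: w2 :: ws2).dropLast = w :: (w2 :: ws2).dropLast :=
          List.dropLast_cons_of_ne_nil (by simp)
        rw [hd, hd2]
        simp only [List.map_cons, addc, List.length_cons]
        refine List.cons_eq_cons.mpr ⟨by push_cast; ring, rfl⟩

lemma addc_zero (xs : List Int) : addc 0 xs = xs := by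
  cases xs <;> simp [addc]

lemma slice_dropLast {α : Type} (xs : List α) :
    PySem.List.slice xs none (some (-1)) = xs.dropLast := by
  simp only [PySem.List.slice, PySem.List.clampIdx]
  cases xs with
  | nil => simp
  | cons x t =>
    have h2 : ¬ ((↑(x :: t).length + (-1 : Int)) < 0) := by simp only [List.length_cons]; push_cast; omega
    simp only [if_pos (show (-1 : Int) < 0 by norm_num), if_neg h2]
    rw [List.dropLast_eq_take]
    simp only [Nat.sub_zero, List.length_cons]
    congr 1
    omega

-- ===== VERDICT (by name: the statement is the Claim_ definition above) =====
theorem White_spaces_spec : Claim_equal_White_spaces := by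
  intro message _
  unfold Spec_White_spaces White_spaces White_spaces_alt
  have hsplit : PySem.Str.split? message " " =
      some ((splitSp message.toList).map String.ofList) := by
    have h := PySem.Str.split?_map message " "
    have h2 : PySem.Chars.split? message.toList " ".toList =
        some (splitSp message.toList) := by
      rw [show (" ".toList) = [' '] from rfl]
      simp [PySem.Chars.split?, splitOn_space]
    rw [h2] at h
    cases hs : PySem.Str.split? message " " with
    | none => rw [hs] at h; simp at h
    | some parts =>
      rw [hs] at h
      simp only [Option.map_some, Option.some.injEq] at h
      congr 1
      have h3 := congrArg (List.map String.ofList) h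
      simpa [Function.comp_def, String.ofList_toList] using h3
  rw [hsplit]
  simp only [Option.getD_some]
  rw [slice_dropLast, foldA_eq, lens_eq, addc_zero, ← List.map_dropLast, List.map_map]
  simp [PySem.Str.len, Function.comp_def]
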